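-- pv_equiv track=rewrite | github.com/Corel-Cormen/Being_a_DIK_PL | scripts/translate.py | prepare_transclate
-- ===== SOURCE A (Python) =====
-- def prepare_transclate(translated, text_marker, character_marker):
--     translated = translated.replace("{} ", "{}")
--     translated = translated.replace(' {/}', '{/}')
--     translated = translated.replace('{/}', '{}')
--     translated = translated.replace(" \\ n", "\\n")
--     translated = translated.replace(" \\ N", "\\n")
--     translated = translated.replace(" \\n ", "\\n")
--
--     for i in range(len(text_marker)):
--         translated = translated.replace('{}', f'{{{text_marker[i]}}}', 1)
--     for i in range(len(character_marker)):
--         translated = translated.replace('[]', f'[{character_marker[i]}]', 1)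
--
--     return translated
-- ===== SOURCE B (Python) =====
-- def _fill(s, pat, markers):
--     # substitute markers[0] into the first occurrence of pat, keep going in the
--     # new text after the already-scanned (pattern-free) prefix
--     if not markers:
--         return s
--     i = s.find(pat)
--     if i < 0:
--         return s
--     return s[:i] + _fill(pat[0] + markers[0] + pat[1] + s[i + 2:], pat, markers[1:])
--
--
-- def prepare_transclate(translated, text_marker, character_marker):
--     for pat, rep in (("{} ", "{}"), (" {/}", "{/}"), ("{/}", "{}"),
--                      (" \\ n", "\\n"), (" \\ N", "\\n"), (" \\n ", "\\n")):
--         translated = translated.replace(pat, rep)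
--     translated = _fill(translated, "{}", text_marker)
--     translated = _fill(translated, "[]", character_marker)
--     return translated
-- ===== Notes on version B (the rewrite author's own statement) =====
-- stated objective: faster
-- what changed: The two loops of repeated replace('{}',...,1) / replace('[]',...,1), each of which rescans the whole string from the start, are replaced by one forward substitution pass per pattern: emit the pattern-free prefix before the first occurrence, splice in the next marker, and continue scanning from the inserted text, so emitted output is never rescanned.
import Mathlib
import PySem

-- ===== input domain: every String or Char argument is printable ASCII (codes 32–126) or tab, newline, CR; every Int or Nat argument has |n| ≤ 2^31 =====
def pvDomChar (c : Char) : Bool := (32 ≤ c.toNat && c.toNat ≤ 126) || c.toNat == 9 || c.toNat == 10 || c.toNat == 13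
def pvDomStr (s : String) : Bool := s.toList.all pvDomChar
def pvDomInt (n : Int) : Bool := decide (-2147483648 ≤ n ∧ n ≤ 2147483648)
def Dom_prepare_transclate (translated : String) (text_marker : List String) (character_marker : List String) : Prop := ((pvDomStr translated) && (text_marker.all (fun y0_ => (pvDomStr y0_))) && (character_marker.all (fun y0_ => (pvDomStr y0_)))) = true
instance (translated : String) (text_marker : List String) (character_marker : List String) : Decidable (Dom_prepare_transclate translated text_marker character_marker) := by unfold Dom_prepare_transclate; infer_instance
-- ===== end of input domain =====

-- B replaces the two loops of full-string replace('{}',…,1) rescans by one forward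
-- substitution pass per pattern: emit the pattern-free prefix once and continue in the
-- inserted text, never re-scanning emitted output (objective: faster).


-- ===== PORT A =====
-- exact port of s.replace(op+cl, rep, 1) for the 2-character patterns "{}" / "[]":
-- replace the leftmost occurrence of the pattern, if any, leave the rest unchanged
def pyReplace1 (op cl : Char) (rep : List Char) : List Char → List Char
  | [] => []
  | [c] => [c]
  | a :: b :: rest =>
      if a = op ∧ b = cl then rep ++ rest
      else a :: pyReplace1 op cl rep (b :: rest)

def prepare_transclate (translated : String) (text_marker : List String) (character_marker : List String) : String :=
  let t := PySem.Str.replace translated "{} " "{}"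
  let t := PySem.Str.replace t " {/}" "{/}"
  let t := PySem.Str.replace t "{/}" "{}"
  let t := PySem.Str.replace t " \\ n" "\\n"
  let t := PySem.Str.replace t " \\ N" "\\n"
  let t := PySem.Str.replace t " \\n " "\\n"
  let s1 := text_marker.foldl (fun s m => pyReplace1 '{' '}' ('{' :: m.toList ++ ['}']) s) t.toList
  let s2 := character_marker.foldl (fun s m => pyReplace1 '[' ']' ('[' :: m.toList ++ [']']) s) s1
  String.ofList s2

-- ===== PORT B =====
-- port of Source B's s.find(pat) for the 2-character pattern op::cl
def findPat (op cl : Char) : List Char → Option Nat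
  | [] => none
  | [_] => none
  | a :: b :: rest =>
      if a = op ∧ b = cl then some 0
      else (findPat op cl (b :: rest)).map (· + 1)

-- port of Source B's _fill: emit the prefix before the first occurrence, substitute the
-- next marker there, continue in the inserted text plus the remaining suffix
def fillR (op cl : Char) : List String → List Char → List Char
  | [], s => s
  | m :: ms, s =>
      match findPat op cl s with
      | none => s
      | some i => s.take i ++ fillR op cl ms (op :: m.toList ++ cl :: s.drop (i + 2))

def prepare_transclate_alt (translated : String) (text_marker : List String) (character_marker : List String) : String :=
  let t := [("{} ", "{}"), (" {/}", "{/}"), ("{/}", "{}"),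
            (" \\ n", "\\n"), (" \\ N", "\\n"), (" \\n ", "\\n")].foldl
            (fun s pr => PySem.Str.replace s pr.1 pr.2) translated
  let s1 := fillR '{' '}' text_marker t.toList
  let s2 := fillR '[' ']' character_marker s1
  String.ofList s2

-- ===== PRECONDITION & SPEC =====
def Spec_prepare_transclate (translated : String) (text_marker : List String) (character_marker : List String) (out : String) : Prop := out = prepare_transclate_alt translated text_marker character_marker
instance (translated : String) (text_marker : List String) (character_marker : List String) (out : String) : Decidable (Spec_prepare_transclate translated text_marker character_marker out) := by unfold Spec_prepare_transclate; infer_instance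

-- ===== CLAIM (what is proved, stated in full; the proofs are below) =====
def Claim_equal_prepare_transclate : Prop := ∀ (translated : String) (text_marker : List String) (character_marker : List String), Dom_prepare_transclate translated text_marker character_marker → Spec_prepare_transclate translated text_marker character_marker (prepare_transclate translated text_marker character_marker)

-- ===== LEMMAS AND PROOFS =====

-- no adjacent op,cl pair anywhere in the string
def noPat (op cl : Char) : List Char → Bool
  | a :: b :: rest => !(a == op && b == cl) && noPat op cl (b :: rest)
  | _ => true

theorem replace_none (op cl : Char) (rep : List Char) :
    ∀ s, findPat op cl s = none → pyReplace1 op cl rep s = s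
  | [], _ => rfl
  | [_], _ => rfl
  | a :: b :: rest, h => by
      by_cases hp : a = op ∧ b = cl
      · simp [findPat, hp] at h
      · simp only [findPat, if_neg hp, Option.map_eq_none_iff] at h
        simp [pyReplace1, hp, replace_none op cl rep (b :: rest) h]

theorem foldl_none (op cl : Char) :
    ∀ (ms : List String) (s : List Char), findPat op cl s = none →
      ms.foldl (fun s m => pyReplace1 op cl (op :: m.toList ++ [cl]) s) s = s := by
  intro ms
  induction ms with
  | nil => intro s _; rfl
  | cons m ms ih =>
      intro s h
      rw [List.foldl_cons, replace_none op cl _ s h, ih s h]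

theorem replace_some (op cl : Char) (mt : List Char) :
    ∀ (s : List Char) (i : Nat), findPat op cl s = some i →
      pyReplace1 op cl (op :: mt ++ [cl]) s
        = s.take i ++ (op :: mt ++ cl :: s.drop (i + 2))
  | [], i, h => by simp [findPat] at h
  | [c], i, h => by simp [findPat] at h
  | a :: b :: rest, i, h => by
      by_cases hp : a = op ∧ b = cl
      · simp only [findPat, if_pos hp, Option.some.injEq] at h
        obtain ⟨ha, hb⟩ := hp
        rw [ha, hb, ← h]
        simp [pyReplace1]
      · simp only [findPat, if_neg hp, Option.map_eq_some_iff] at h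
        obtain ⟨j, hj, hi⟩ := h
        have hrec := replace_some op cl mt (b :: rest) j hj
        subst hi
        have hstep : pyReplace1 op cl (op :: mt ++ [cl]) (a :: b :: rest)
            = a :: pyReplace1 op cl (op :: mt ++ [cl]) (b :: rest) := by
          simp [pyReplace1, hp]
        have e : j + 1 + 2 = j + 2 + 1 := by omega
        rw [hstep, hrec, List.take_succ_cons, e, List.drop_succ_cons]
        simp

theorem take_noPat (op cl : Char) (hop : op ≠ cl) :
    ∀ (s : List Char) (i : Nat), findPat op cl s = some i →
      noPat op cl (s.take i ++ [op]) = true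
  | [], i, h => by simp [findPat] at h
  | [c], i, h => by simp [findPat] at h
  | a :: b :: rest, i, h => by
      by_cases hp : a = op ∧ b = cl
      · simp only [findPat, if_pos hp, Option.some.injEq] at h
        rw [← h]
        simp [noPat]
      · simp only [findPat, if_neg hp, Option.map_eq_some_iff] at h
        obtain ⟨j, hj, hi⟩ := h
        have ihp := take_noPat op cl hop (b :: rest) j hj
        subst hi
        cases j with
        | zero =>
            simp only [List.take_succ_cons, List.take_zero, List.nil_append,
              List.cons_append] at ihp ⊢
            simp [noPat, hop]
        | succ k =>
            simp only [List.take_succ_cons, List.cons_append] at ihp ⊢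
            simp only [noPat, Bool.and_eq_true] at ihp ⊢
            refine ⟨?_, ihp⟩
            simp only [Bool.not_eq_eq_eq_not, Bool.not_true, Bool.and_eq_false_iff]
            rcases not_and_or.mp hp with h1 | h1
            · exact Or.inl (by simpa [beq_iff_eq] using h1)
            · exact Or.inr (by simpa [beq_iff_eq] using h1)

-- pyReplace1 with a replacement starting with op keeps the head character
theorem pyReplace1_keeps_head (op cl : Char) (m : List Char) (b : Char) (rest : List Char) :
    ∃ t, pyReplace1 op cl (op :: m) (b :: rest) = b :: t := by
  cases rest with
  | nil => exact ⟨[], rfl⟩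
  | cons x xs =>
      by_cases h : b = op ∧ x = cl
      · obtain ⟨hb, hx⟩ := h
        refine ⟨m ++ xs, ?_⟩
        rw [hb, hx]; simp [pyReplace1]
      · exact ⟨pyReplace1 op cl (op :: m) (x :: xs), by simp [pyReplace1, h]⟩

-- pyReplace1 skips over a block it cannot match into
theorem replace_prepend (op cl : Char) (rep : List Char) :
    ∀ (out s : List Char), noPat op cl (out ++ s.take 1) = true →
      pyReplace1 op cl rep (out ++ s) = out ++ pyReplace1 op cl rep s
  | [], s, _ => by simp
  | [a], s, h => by
      cases s with
      | nil => rfl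
      | cons x xs =>
          have hp : ¬ (a = op ∧ x = cl) := by
            simp [noPat] at h
            tauto
          simp [pyReplace1, hp]
  | a :: c :: out'', s, h => by
      have h1 : ¬ (a = op ∧ c = cl) := by
        simp only [List.cons_append, noPat, Bool.and_eq_true] at h
        intro hc
        simp [hc.1, hc.2] at h
      have h2 : noPat op cl ((c :: out'') ++ s.take 1) = true := by
        simp only [List.cons_append, noPat, Bool.and_eq_true] at h
        exact h.2
      have := replace_prepend op cl rep (c :: out'') s h2
      simp only [List.cons_append] at this ⊢
      simp [pyReplace1, h1, this]

-- a whole substitution loop skips over such a block too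
theorem foldl_prepend (op cl : Char) :
    ∀ (ms : List String) (out s : List Char), noPat op cl (out ++ s.take 1) = true →
      ms.foldl (fun s m => pyReplace1 op cl (op :: m.toList ++ [cl]) s) (out ++ s)
        = out ++ ms.foldl (fun s m => pyReplace1 op cl (op :: m.toList ++ [cl]) s) s := by
  intro ms
  induction ms with
  | nil => intro out s _; rfl
  | cons m ms ih =>
      intro out s h
      rw [List.foldl_cons, List.foldl_cons,
          replace_prepend op cl (op :: m.toList ++ [cl]) out s h]
      cases s with
      | nil => exact ih out [] (by simpa using h)
      | cons x xs =>
          obtain ⟨t, ht⟩ := pyReplace1_keeps_head op cl (m.toList ++ [cl]) x xs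
          have ht' : pyReplace1 op cl (op :: m.toList ++ [cl]) (x :: xs) = x :: t := by
            simpa [List.cons_append] using ht
          rw [ht']
          exact ih out (x :: t) (by simpa using h)

-- A's whole substitution loop equals B's forward pass
theorem fill_eq (op cl : Char) (hop : op ≠ cl) :
    ∀ (ms : List String) (s : List Char),
      ms.foldl (fun s m => pyReplace1 op cl (op :: m.toList ++ [cl]) s) s
        = fillR op cl ms s := by
  intro ms
  induction ms with
  | nil => intro s; rfl
  | cons m ms ih =>
      intro s
      cases hf : findPat op cl s with
      | none =>
          rw [List.foldl_cons, replace_none op cl _ s hf, foldl_none op cl ms s hf]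
          simp [fillR, hf]
      | some i =>
          rw [List.foldl_cons, replace_some op cl m.toList s i hf,
              foldl_prepend op cl ms (s.take i) _
                (by simpa using take_noPat op cl hop s i hf),
              ih]
          simp [fillR, hf]

-- ===== VERDICT (by name: the statement is the Claim_ definition above) =====
theorem prepare_transclate_spec : Claim_equal_prepare_transclate := by
  intro translated text_marker character_marker _
  unfold Spec_prepare_transclate prepare_transclate prepare_transclate_alt
  simp only [List.foldl]
  rw [fill_eq '{' '}' (by decide) text_marker,
      fill_eq '[' ']' (by decide) character_marker]
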